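-- pv_equiv track=rewrite | github.com/GoncaloPascoal/advent-of-code | 2023/python/day09.py | part_1
-- ===== SOURCE A (Python) =====
-- def calculate_differences(series: list[int]) -> list[list[int]]:
--     differences = [series]
--     while any(differences[-1]):
--         differences.append([b - a for a, b in zip(differences[-1], differences[-1][1:])])
--     return differences
--
-- def part_1(data: list[list[int]]) -> int:
--     sum_extrapolated = 0
--
--     for series in data:
--         differences = calculate_differences(series)
--
--         differences[-1].append(0)
--         for prev_seq, seq in zip(differences[::-1], differences[-2::-1]):
--             seq.append(seq[-1] + prev_seq[-1])
--
--         sum_extrapolated += differences[0][-1]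
--
--     return sum_extrapolated
-- ===== SOURCE B (Python) =====
-- def part_1(data: list[int]) -> int:
--     # Newton forward-difference closed form: next value of a series of length n
--     # equals sum_{k=0}^{n-1} (-1)^k * C(n, k+1) * series[n-1-k], with the
--     # binomial coefficient updated incrementally (exact integer division).
--     total = 0
--     for series in data:
--         n = len(series)
--         acc = 0
--         sign = 1
--         c = n  # C(n, 1)
--         for k in range(n):
--             acc += sign * c * series[n - 1 - k]
--             sign = -sign
--             c = c * (n - k - 1) // (k + 2)  # C(n, k+2)
--         total += acc
--     return total
-- ===== Notes on version B (the rewrite author's own statement) =====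
-- stated objective: faster
-- what changed: Replaces the per-series finite-difference table plus backward extrapolation pass by the Newton forward-difference closed form sum((-1)^k * C(n,k+1) * series[n-1-k]) with incrementally updated binomial coefficients.
import Mathlib
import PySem

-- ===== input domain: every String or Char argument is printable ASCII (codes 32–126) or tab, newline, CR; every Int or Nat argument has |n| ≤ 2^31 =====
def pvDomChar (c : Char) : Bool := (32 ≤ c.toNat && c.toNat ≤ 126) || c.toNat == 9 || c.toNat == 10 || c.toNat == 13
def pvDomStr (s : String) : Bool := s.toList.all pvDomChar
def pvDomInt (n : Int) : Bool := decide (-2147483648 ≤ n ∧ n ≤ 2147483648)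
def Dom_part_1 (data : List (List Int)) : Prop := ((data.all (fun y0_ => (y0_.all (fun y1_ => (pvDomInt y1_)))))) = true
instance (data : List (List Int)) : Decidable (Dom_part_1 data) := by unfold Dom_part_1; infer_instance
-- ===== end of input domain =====

-- B replaces A's full difference table and backward extrapolation pass by the Newton
-- forward-difference closed form with incrementally updated binomial coefficients
-- (O(m·n) instead of O(m·n²)); the equivalence is about the RETURN value only —
-- Python A mutates its input sublists in place (appends extrapolated values), B does not.

-- ===== PORT A =====
-- [b - a for a, b in zip(r, r[1:])]
def diffRow (r : List Int) : List Int := List.zipWith (fun a b => b - a) r r.tail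

theorem diffRow_length_lt (r : List Int) (h : r.any (fun x => decide (x ≠ 0)) = true) :
    (diffRow r).length < r.length := by
  rcases r with _ | ⟨x, xs⟩
  · simp at h
  · simp [diffRow]

-- calculate_differences: while any(differences[-1]): append the difference row
def buildDiffs (r : List Int) : List (List Int) :=
  if _h : r.any (fun x => decide (x ≠ 0)) = true then r :: buildDiffs (diffRow r) else [r]
  termination_by r.length
  decreasing_by exact diffRow_length_lt r _h

-- the in-place backward pass: each seq gets seq[-1] + prev_seq[-1] appended and becomes
-- the next prev_seq; returns the final (topmost) extended row.
-- seq here is always nonempty on reachable inputs (it satisfied `any`), so getLastD 0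
-- is exact for Python's seq[-1].
def extendLoop (prev : List Int) : List (List Int) → List Int
  | [] => prev
  | seq :: rest => extendLoop (seq ++ [seq.getLastD 0 + prev.getLastD 0]) rest

-- per-series extrapolated value: differences[-1].append(0); backward pass; differences[0][-1]
def extrapolate (s : List Int) : Int :=
  match (buildDiffs s).reverse with
  | [] => 0   -- unreachable: buildDiffs is never empty
  | lastRow :: rest => (extendLoop (lastRow ++ [0]) rest).getLastD 0

def part_1 (data : List (List Int)) : Int :=
  data.foldl (fun acc s => acc + extrapolate s) 0

-- ===== PORT B =====
-- state (acc, sign, c); c is kept equal to C(n, k+1) by exact integer division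
def part_1_alt (data : List (List Int)) : Int :=
  data.foldl (fun total s =>
    let n : Int := s.length
    let r := (PySem.List.pyRange 0 n 1).foldl
      (fun (st : Int × Int × Int) k =>
        (st.1 + st.2.1 * st.2.2 * ((PySem.List.pyGet? s (n - 1 - k)).getD 0),
         -st.2.1,
         PySem.Int.floordiv (st.2.2 * (n - k - 1)) (k + 2)))
      (0, 1, n)
    total + r.1) 0

-- ===== PRECONDITION & SPEC =====
def Spec_part_1 (data : List (List Int)) (out : Int) : Prop := out = part_1_alt data
instance (data : List (List Int)) (out : Int) : Decidable (Spec_part_1 data out) := by unfold Spec_part_1; infer_instance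

-- ===== CLAIM (what is proved, stated in full; the proofs are below) =====
def Claim_equal_part_1 : Prop := ∀ (data : List (List Int)), Dom_part_1 data → Spec_part_1 data (part_1 data)

-- ===== LEMMAS AND PROOFS =====

-- Newton forward-difference value: the common spec both ports are reduced to
def nwt (s : List Int) : Int :=
  ∑ k ∈ Finset.range s.length,
    (-1 : Int) ^ k * (Nat.choose s.length (k + 1) : Int) * s.getD (s.length - 1 - k) 0

def term (s : List Int) (k : Nat) : Int :=
  (-1 : Int) ^ k * (Nat.choose s.length (k + 1) : Int) * s.getD (s.length - 1 - k) 0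

theorem Binv (s : List Int) (j : Nat) (hj : j ≤ s.length) :
    ((PySem.List.pyRange 0 (j : Int) 1).foldl
      (fun (st : Int × Int × Int) k =>
        (st.1 + st.2.1 * st.2.2 * ((PySem.List.pyGet? s ((s.length : Int) - 1 - k)).getD 0),
         -st.2.1,
         PySem.Int.floordiv (st.2.2 * ((s.length : Int) - k - 1)) (k + 2)))
      (0, 1, (s.length : Int)))
    = (∑ k ∈ Finset.range j, term s k, (-1 : Int) ^ j, (Nat.choose s.length (j + 1) : Int)) := by
  induction j with
  | zero =>
    simp [PySem.List.pyRange_one_eq_nil (by omega : (0:Int) ≤ 0), Nat.choose_one_right]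
  | succ j ih =>
    have hj' : j < s.length := by omega
    have hcast : ((j + 1 : Nat) : Int) = (j : Int) + 1 := by push_cast; ring
    rw [hcast, PySem.List.pyRange_one_succ_right (by positivity), List.foldl_append,
        ih (by omega)]
    simp only [List.foldl_cons, List.foldl_nil]
    refine Prod.ext ?_ (Prod.ext ?_ ?_)
    · show (∑ k ∈ Finset.range j, term s k) + _ = _
      rw [Finset.sum_range_succ]
      congr 1
      unfold term
      congr 1
      have hidx : (s.length : Int) - 1 - (j : Int) = ((s.length - 1 - j : Nat) : Int) := by
        omega
      rw [hidx, PySem.List.pyGet?_natCast]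
      rw [List.getD_eq_getElem?_getD]
    · show -(-1 : Int) ^ j = (-1 : Int) ^ (j + 1)
      ring
    · show PySem.Int.floordiv ((Nat.choose s.length (j+1) : Int) * ((s.length : Int) - (j:Int) - 1)) ((j:Int) + 2) = _
      have h1 : ((s.length : Int) - (j:Int) - 1) = ((s.length - (j+1) : Nat) : Int) := by
        omega
      have h2 : ((j : Int) + 2) = ((j + 2 : Nat) : Int) := by push_cast; ring
      rw [h1, h2, ← Nat.cast_mul, PySem.Int.floordiv_natCast]
      congr 1
      have := Nat.choose_succ_right_eq s.length (j+1)
      have h3 : s.length.choose (j+1) * (s.length - (j+1)) = s.length.choose (j+2) * (j+2) := by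
        rw [← Nat.choose_succ_right_eq s.length (j+1)]
      rw [h3, Nat.mul_div_cancel _ (by omega)]

theorem buildDiffs_ne_nil (s : List Int) : buildDiffs s ≠ [] := by
  rw [buildDiffs]; split <;> simp

theorem getLastD_zero_of_any_false (r : List Int) (h : r.any (fun x => decide (x ≠ 0)) = false) :
    r.getLastD 0 = 0 := by
  rcases r with _ | ⟨x, xs⟩
  · rfl
  · simp only [List.any_eq_false, decide_eq_true_eq, not_not] at h
    rw [List.getLastD_eq_getLast?, List.getLast?_eq_some_getLast (l := x::xs) (by simp), Option.getD_some]
    exact h _ (List.getLast_mem _)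

theorem getLastD_cons_ne {α : Type} (a : α) (l : List α) (d : α) (h : l ≠ []) :
    (a :: l).getLastD d = l.getLastD d := by
  rcases l with _ | ⟨b, bs⟩
  · exact absurd rfl h
  · rfl

theorem lastRow_any_false (s : List Int) :
    ((buildDiffs s).getLastD []).any (fun x => decide (x ≠ 0)) = false := by
  induction hn : s.length using Nat.strong_induction_on generalizing s with
  | _ n ih =>
    rw [buildDiffs]
    split
    · rename_i h
      rw [getLastD_cons_ne _ _ _ (buildDiffs_ne_nil _)]
      exact ih (diffRow s).length (hn ▸ diffRow_length_lt s h) _ rfl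
    · rename_i h
      simpa using eq_false_of_ne_true h

theorem extendLoop_last (rows : List (List Int)) :
    ∀ prev, (extendLoop prev rows).getLastD 0
      = prev.getLastD 0 + (rows.map (fun r => r.getLastD 0)).sum := by
  induction rows with
  | nil => intro prev; simp [extendLoop]
  | cons seq rest ih =>
    intro prev
    rw [extendLoop, ih]
    simp
    ring

theorem extrapolate_eq_sum (s : List Int) :
    extrapolate s = ((buildDiffs s).map (fun r => r.getLastD 0)).sum := by
  have hne := buildDiffs_ne_nil s
  have hsplit : buildDiffs s = (buildDiffs s).dropLast ++ [(buildDiffs s).getLast hne] :=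
    (List.dropLast_append_getLast hne).symm
  have hrev : (buildDiffs s).reverse
      = (buildDiffs s).getLast hne :: (buildDiffs s).dropLast.reverse := by
    conv_lhs => rw [hsplit]
    simp
  unfold extrapolate
  rw [hrev]
  simp only []
  have hlast0 : ((buildDiffs s).getLast hne).getLastD 0 = 0 := by
    apply getLastD_zero_of_any_false
    have := lastRow_any_false s
    rwa [List.getLastD_eq_getLast?, List.getLast?_eq_some_getLast hne, Option.getD_some] at this
  rw [extendLoop_last, List.getLastD_concat]
  conv_rhs => rw [hsplit]
  rw [List.map_append, List.sum_append, List.map_reverse, List.sum_reverse]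
  rw [List.getLastD_eq_getLast?] at hlast0
  simp [hlast0]

theorem nwt_shift (s : List Int) (h : s ≠ []) : nwt s = s.getLastD 0 + nwt (diffRow s) := by
  obtain ⟨m, hm⟩ : ∃ m, s.length = m + 1 := by
    rcases s with _ | ⟨x, xs⟩
    · exact absurd rfl h
    · exact ⟨xs.length, by simp⟩
  have hdl : (diffRow s).length = m := by
    rcases s with _ | ⟨x, xs⟩
    · exact absurd rfl h
    · simp [diffRow] at hm ⊢; omega
  have hgl : s.getLastD 0 = s.getD m 0 := by
    rw [List.getLastD_eq_getLast?, List.getLast?_eq_getElem?, List.getD_eq_getElem?_getD, hm]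
    simp
  have hDget : ∀ k, k < m → (diffRow s).getD k 0 = s.getD (k + 1) 0 - s.getD k 0 := by
    intro k hk
    have h1 : k < (diffRow s).length := by omega
    have h2 : k < s.length := by omega
    have h3 : k + 1 < s.length := by omega
    rw [List.getD_eq_getElem _ _ h1, List.getD_eq_getElem _ _ h2, List.getD_eq_getElem _ _ h3]
    simp only [diffRow, List.getElem_zipWith]
    congr 1
    rcases s with _ | ⟨x, xs⟩
    · exact absurd rfl h
    · simp
  unfold nwt
  rw [hm, hdl, hgl]
  have hidx : ∀ k : Nat, m + 1 - 1 - k = m - k := fun k => by omega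
  simp only [hidx]
  have hD : ∀ k ∈ Finset.range m,
      (-1:Int)^k * (Nat.choose m (k+1) : Int) * (diffRow s).getD (m-1-k) 0
      = ((-1:Int)^k * (Nat.choose m (k+1) : Int) * s.getD (m-k) 0)
        - ((-1:Int)^k * (Nat.choose m (k+1) : Int) * s.getD (m-1-k) 0) := by
    intro k hk
    rw [Finset.mem_range] at hk
    rw [hDget (m-1-k) (by omega)]
    have : m - 1 - k + 1 = m - k := by omega
    rw [this]
    ring
  rw [Finset.sum_congr rfl hD, Finset.sum_sub_distrib]
  have hpas : ∀ k ∈ Finset.range (m+1),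
      (-1:Int)^k * (Nat.choose (m+1) (k+1) : Int) * s.getD (m-k) 0
      = (-1:Int)^k * (Nat.choose m k : Int) * s.getD (m-k) 0
        + (-1:Int)^k * (Nat.choose m (k+1) : Int) * s.getD (m-k) 0 := by
    intro k _
    rw [Nat.choose_succ_succ]
    push_cast
    ring
  rw [Finset.sum_congr rfl hpas, Finset.sum_add_distrib]
  rw [Finset.sum_range_succ (fun k => (-1:Int)^k * (Nat.choose m (k+1) : Int) * s.getD (m-k) 0) m]
  rw [Finset.sum_range_succ' (fun k => (-1:Int)^k * (Nat.choose m k : Int) * s.getD (m-k) 0) m]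
  have hneg : ∀ k ∈ Finset.range m,
      (-1:Int)^(k+1) * (Nat.choose m (k+1) : Int) * s.getD (m-(k+1)) 0
      = -((-1:Int)^k * (Nat.choose m (k+1) : Int) * s.getD (m-1-k) 0) := by
    intro k _
    have : m - (k+1) = m - 1 - k := by omega
    rw [this]
    ring
  rw [Finset.sum_congr rfl hneg, Finset.sum_neg_distrib]
  simp [Nat.choose_succ_self]
  ring

theorem nwt_zero_of_any_false (s : List Int) (h : s.any (fun x => decide (x ≠ 0)) = false) :
    nwt s = 0 := by
  unfold nwt
  apply Finset.sum_eq_zero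
  intro k hk
  rw [Finset.mem_range] at hk
  have hlt : s.length - 1 - k < s.length := by omega
  rw [List.getD_eq_getElem _ _ hlt]
  simp only [List.any_eq_false, decide_eq_true_eq, not_not] at h
  rw [h _ (s.getElem_mem hlt)]
  ring

theorem tsum_eq_nwt (s : List Int) :
    ((buildDiffs s).map (fun r => r.getLastD 0)).sum = nwt s := by
  induction hn : s.length using Nat.strong_induction_on generalizing s with
  | _ n ih =>
    rw [buildDiffs]
    split
    · rename_i h
      have hne : s ≠ [] := by rintro rfl; simp at h
      rw [List.map_cons, List.sum_cons,
          ih (diffRow s).length (hn ▸ diffRow_length_lt s h) _ rfl, nwt_shift s hne]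
    · rename_i h
      rw [List.map_singleton, List.sum_singleton,
          getLastD_zero_of_any_false s (eq_false_of_ne_true h),
          nwt_zero_of_any_false s (eq_false_of_ne_true h)]

theorem extrapolate_eq_nwt (s : List Int) : extrapolate s = nwt s :=
  (extrapolate_eq_sum s).trans (tsum_eq_nwt s)

theorem alt_inner_eq_nwt (s : List Int) :
    ((PySem.List.pyRange 0 (s.length : Int) 1).foldl
      (fun (st : Int × Int × Int) k =>
        (st.1 + st.2.1 * st.2.2 * ((PySem.List.pyGet? s ((s.length : Int) - 1 - k)).getD 0),
         -st.2.1,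
         PySem.Int.floordiv (st.2.2 * ((s.length : Int) - k - 1)) (k + 2)))
      (0, 1, (s.length : Int))).1 = nwt s := by
  rw [Binv s s.length le_rfl]
  rfl

theorem foldl_congr_int (f g : Int → List Int → Int) (h : ∀ a s, f a s = g a s) :
    ∀ (l : List (List Int)) (a : Int), l.foldl f a = l.foldl g a := by
  intro l
  induction l with
  | nil => intro a; rfl
  | cons x xs ih => intro a; rw [List.foldl_cons, List.foldl_cons, h, ih]

-- ===== VERDICT (by name: the statement is the Claim_ definition above) =====
theorem part_1_spec : Claim_equal_part_1 := by
  intro data _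
  show part_1 data = part_1_alt data
  unfold part_1 part_1_alt
  calc data.foldl (fun acc s => acc + extrapolate s) 0
      = data.foldl (fun acc s => acc + nwt s) 0 :=
        foldl_congr_int _ _ (fun a s => by rw [extrapolate_eq_nwt]) data 0
    _ = _ :=
        (foldl_congr_int _ _ (fun a s => by show a + _ = a + nwt s; rw [alt_inner_eq_nwt]) data 0).symm
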